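-- pv_equiv track=rewrite | github.com/geronimobergk/semg-protocol-sensitivity | tinyml_semg_classifier/reporting/compare.py | _ordered_model_labels
-- ===== SOURCE A (Python) =====
-- MODEL_LABELS = {
--     "st_cnn_gn": "ST-CNN",
--     "st_cnn": "ST-CNN",
--     "tiny_cnn": "ST-CNN",
--     "st_attn_cnn_gn": "ST-Attn-CNN",
--     "st_attn_cnn": "ST-Attn-CNN",
--     "tiny_attn_cnn": "ST-Attn-CNN",
-- }
--
-- MODEL_ORDER = ["ST-CNN", "ST-Attn-CNN"]
--
-- def _model_label(model_id: str) -> str: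
--     return MODEL_LABELS.get(model_id, model_id)
--
-- def _ordered_model_labels(rows: list[dict]) -> list[str]:
--     labels = {
--         _model_label(str(row.get("model", "")))
--         for row in rows
--         if row.get("model") is not None
--     }
--     ordered = [label for label in MODEL_ORDER if label in labels]
--     for label in sorted(labels):
--         if label not in ordered:
--             ordered.append(label)
--     return ordered or MODEL_ORDER
-- ===== SOURCE B (Python) =====
-- MODEL_LABELS = {
--     "st_cnn_gn": "ST-CNN",
--     "st_cnn": "ST-CNN",
--     "tiny_cnn": "ST-CNN",
--     "st_attn_cnn_gn": "ST-Attn-CNN",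
--     "st_attn_cnn": "ST-Attn-CNN",
--     "tiny_attn_cnn": "ST-Attn-CNN",
-- }
--
-- MODEL_ORDER = ["ST-CNN", "ST-Attn-CNN"]
--
-- def _model_label(model_id: str) -> str:
--     return MODEL_LABELS.get(model_id, model_id)
--
-- def _ordered_model_labels(rows: list[dict]) -> list[str]:
--     labels = {
--         _model_label(str(row.get("model", "")))
--         for row in rows
--         if row.get("model") is not None
--     }
--     rank = {label: i for i, label in enumerate(MODEL_ORDER)}
--     result = sorted(labels, key=lambda l: (rank.get(l, len(MODEL_ORDER)), l))
--     return result or MODEL_ORDER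
-- ===== Notes on version B (the rewrite author's own statement) =====
-- stated objective: idiomatic
-- what changed: A's two ordering passes (filter MODEL_ORDER against the label set, then a loop appending the sorted remainder with membership tests) are replaced by one sorted() call keyed by (index-in-MODEL_ORDER with sentinel 2, label) built from a rank dict.
import Mathlib
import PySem

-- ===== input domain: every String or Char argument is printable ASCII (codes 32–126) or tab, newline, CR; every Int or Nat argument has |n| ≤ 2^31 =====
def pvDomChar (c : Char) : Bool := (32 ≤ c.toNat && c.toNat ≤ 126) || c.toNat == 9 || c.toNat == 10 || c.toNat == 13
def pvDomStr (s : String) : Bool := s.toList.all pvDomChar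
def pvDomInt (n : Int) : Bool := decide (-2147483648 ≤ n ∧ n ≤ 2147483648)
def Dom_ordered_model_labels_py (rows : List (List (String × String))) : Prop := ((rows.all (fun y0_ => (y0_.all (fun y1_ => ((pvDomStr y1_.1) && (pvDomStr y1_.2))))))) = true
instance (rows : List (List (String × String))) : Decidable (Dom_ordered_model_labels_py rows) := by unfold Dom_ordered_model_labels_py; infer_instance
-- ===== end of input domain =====

-- B replaces A's two ordering passes (MODEL_ORDER filter, then append-sorted-remainder loop)
-- with a single sort keyed by (rank-in-MODEL_ORDER-or-sentinel, label); objective: idiomatic.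

-- shared module context (both Pythons use the same constants and the _model_label helper,
-- and both build `labels` with the textually identical set comprehension)
def pyMODEL_LABELS : PySem.Dict String String := PySem.Dict.mk
  [("st_cnn_gn", "ST-CNN"), ("st_cnn", "ST-CNN"), ("tiny_cnn", "ST-CNN"),
   ("st_attn_cnn_gn", "ST-Attn-CNN"), ("st_attn_cnn", "ST-Attn-CNN"),
   ("tiny_attn_cnn", "ST-Attn-CNN")]

def pyMODEL_ORDER : List String := ["ST-CNN", "ST-Attn-CNN"]

def model_label (model_id : String) : String := PySem.Dict.getD pyMODEL_LABELS model_id model_id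

-- { _model_label(str(row.get("model", ""))) for row in rows if row.get("model") is not None }
def collectLabels (rows : List (List (String × String))) : PySem.Set String :=
  rows.foldl (fun s row =>
    if ((PySem.Dict.mk row).get? "model").isSome then
      PySem.Set.add s (model_label (((PySem.Dict.mk row).get? "model").getD ""))
    else s) PySem.Set.empty

-- ===== PORT A =====
def ordered_model_labels_py (rows : List (List (String × String))) : List String :=
  let labels := collectLabels rows
  let ordered := pyMODEL_ORDER.filter (fun label => PySem.Set.contains labels label)
  let ordered := (PySem.List.sorted labels (fun x => x)).foldl
      (fun acc label => if acc.contains label then acc else acc ++ [label]) ordered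
  if ordered = [] then pyMODEL_ORDER else ordered

-- ===== PORT B =====
def ordered_model_labels_py_alt (rows : List (List (String × String))) : List String :=
  let labels := collectLabels rows
  let rank : PySem.Dict String Int :=
    (PySem.List.enumerate pyMODEL_ORDER).foldl (fun d p => d.insert p.2 p.1) PySem.Dict.empty
  let result := PySem.List.sorted2 labels
      (fun l => rank.getD l ((pyMODEL_ORDER.length : Int))) (fun l => l)
  if result = [] then pyMODEL_ORDER else result

-- ===== PRECONDITION & SPEC =====
def Spec_ordered_model_labels_py (rows : List (List (String × String))) (out : List String) : Prop := out = ordered_model_labels_py_alt rows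
instance (rows : List (List (String × String))) (out : List String) : Decidable (Spec_ordered_model_labels_py rows out) := by unfold Spec_ordered_model_labels_py; infer_instance

-- ===== CLAIM (what is proved, stated in full; the proofs are below) =====
def Claim_equal_ordered_model_labels_py : Prop := ∀ (rows : List (List (String × String))), Dom_ordered_model_labels_py rows → Spec_ordered_model_labels_py rows (ordered_model_labels_py rows)

-- ===== LEMMAS AND PROOFS =====

-- the rank key B's dict computes
def rankOf (l : String) : Int := if l = "ST-CNN" then 0 else if l = "ST-Attn-CNN" then 1 else 2

-- B's tuple sort key, as a value of a lexicographic linear order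
def lexKey (l : String) : Lex (Int × String) := toLex (rankOf l, l)

-- the common canonical result both ports are shown to compute (for the label set L)
def canon (L : List String) : List String :=
  pyMODEL_ORDER.filter (fun m => PySem.Set.contains L m) ++
    PySem.List.sorted (L.filter (fun l => !(pyMODEL_ORDER.contains l))) (fun x => x)

lemma nodup_foldl_collect (rows : List (List (String × String))) (s : PySem.Set String)
    (hs : s.Nodup) :
    (rows.foldl (fun s row =>
      if ((PySem.Dict.mk row).get? "model").isSome then
        PySem.Set.add s (model_label (((PySem.Dict.mk row).get? "model").getD ""))
      else s) s).Nodup := by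
  induction rows generalizing s with
  | nil => exact hs
  | cons r rs ih =>
      simp only [List.foldl_cons]
      apply ih
      split
      · exact PySem.Set.nodup_add _ _ hs
      · exact hs

lemma nodup_collectLabels (rows : List (List (String × String))) : (collectLabels rows).Nodup :=
  nodup_foldl_collect rows PySem.Set.empty List.nodup_nil

lemma rankOf_eq_two {l : String} (hl : l ∉ pyMODEL_ORDER) : rankOf l = 2 := by
  simp [pyMODEL_ORDER] at hl
  simp [rankOf, hl.1, hl.2]

lemma rankOf_lt_two {l : String} (hl : l ∈ pyMODEL_ORDER) : rankOf l < 2 := by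
  simp [pyMODEL_ORDER] at hl
  rcases hl with h | h <;> subst h <;> decide

lemma getD_rankDict (l : String) :
    PySem.Dict.getD ((PySem.List.enumerate pyMODEL_ORDER).foldl (fun d p => d.insert p.2 p.1) PySem.Dict.empty) l ((pyMODEL_ORDER.length : Int)) = rankOf l := by
  have hd : ((PySem.List.enumerate pyMODEL_ORDER).foldl (fun d p => d.insert p.2 p.1) PySem.Dict.empty) = PySem.Dict.mk [("ST-CNN", (0 : Int)), ("ST-Attn-CNN", 1)] := by decide
  rw [hd]
  by_cases h1 : l = "ST-CNN"
  · subst h1; decide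
  by_cases h2 : l = "ST-Attn-CNN"
  · subst h2; decide
  have hb1 : ("ST-CNN" == l) = false := beq_eq_false_iff_ne.mpr (Ne.symm h1)
  have hb2 : ("ST-Attn-CNN" == l) = false := beq_eq_false_iff_ne.mpr (Ne.symm h2)
  simp [PySem.Dict.getD, PySem.Dict.get?_mk_cons, hb1, hb2, rankOf, h1, h2, pyMODEL_ORDER,
    PySem.Dict.get?]

lemma before_fun_eq (a b : String) :
    (decide (rankOf a < rankOf b) || (!decide (rankOf b < rankOf a) && decide (a < b)))
      = decide (lexKey a < lexKey b) := by
  simp only [← decide_not, ← Bool.decide_and, ← Bool.decide_or]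
  rw [decide_eq_decide]
  rw [lexKey, lexKey, Prod.Lex.lt_iff]
  simp only [ofLex_toLex]
  constructor
  · rintro (h | ⟨h1, h2⟩)
    · exact Or.inl h
    · rcases lt_trichotomy (rankOf a) (rankOf b) with h | h | h
      · exact Or.inl h
      · exact Or.inr ⟨h, h2⟩
      · exact absurd h h1
  · rintro (h | ⟨h1, h2⟩)
    · exact Or.inl h
    · exact Or.inr ⟨by omega, h2⟩

lemma sorted2_eq_sorted_lexKey (L : List String) :
    PySem.List.sorted2 L (fun l => PySem.Dict.getD ((PySem.List.enumerate pyMODEL_ORDER).foldl (fun d p => d.insert p.2 p.1) PySem.Dict.empty) l ((pyMODEL_ORDER.length : Int))) (fun l => l)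
      = PySem.List.sorted L lexKey := by
  simp only [getD_rankDict]
  have h1 : PySem.List.sorted2 L rankOf (fun l : String => l)
      = List.foldl (fun acc x => PySem.List.insertBy
          (fun a b => decide (rankOf a < rankOf b) || (!decide (rankOf b < rankOf a) && decide (a < b))) x acc) [] L := rfl
  rw [h1, PySem.List.sorted_eq_foldl_insertBy]
  have h2 : (fun a b : String => decide (rankOf a < rankOf b) || (!decide (rankOf b < rankOf a) && decide (a < b)))
      = fun a b : String => decide (lexKey a < lexKey b) := by
    funext a b; exact before_fun_eq a b
  rw [h2]

lemma nodup_canon {L : List String} (h : L.Nodup) : (canon L).Nodup := by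
  unfold canon
  apply List.Nodup.append
  · exact (by decide : pyMODEL_ORDER.Nodup).filter _
  · exact ((PySem.List.sorted_perm _ _ _).nodup_iff).mpr (h.filter _)
  · intro a ha hb
    have h1 : a ∈ pyMODEL_ORDER := (List.mem_filter.mp ha).1
    have h2 : a ∈ L.filter (fun l => !(pyMODEL_ORDER.contains l)) :=
      (PySem.List.mem_sorted _ _ _ _).mp hb
    have h3 := (List.mem_filter.mp h2).2
    simp at h3
    exact h3 h1

lemma canon_perm {L : List String} (h : L.Nodup) : (canon L).Perm L := by
  rw [List.perm_ext_iff_of_nodup (nodup_canon h) h]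
  intro a
  simp [canon, List.mem_filter, PySem.List.mem_sorted, PySem.Set.contains_iff]
  tauto

lemma canon_pairwise {L : List String} (h : L.Nodup) :
    (canon L).Pairwise (fun a b => lexKey a < lexKey b) := by
  unfold canon
  rw [List.pairwise_append]
  refine ⟨?_, ?_, ?_⟩
  · apply List.Pairwise.sublist List.filter_sublist
    constructor
    · intro b hb
      simp [pyMODEL_ORDER] at hb
      subst hb
      rw [lexKey, lexKey, Prod.Lex.lt_iff]
      simp only [ofLex_toLex]
      left
      decide
    · simp
  · have hnd : (PySem.List.sorted (L.filter (fun l => !(pyMODEL_ORDER.contains l))) (fun x : String => x)).Nodup :=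
      ((PySem.List.sorted_perm _ _ _).nodup_iff).mpr (h.filter _)
    have hle := PySem.List.sorted_pairwise (L.filter (fun l => !(pyMODEL_ORDER.contains l))) (fun x : String => x)
    have hlt : (PySem.List.sorted (L.filter (fun l => !(pyMODEL_ORDER.contains l))) (fun x : String => x)).Pairwise (fun a b : String => a < b) :=
      (hle.and hnd).imp (fun hab => lt_of_le_of_ne hab.1 hab.2)
    apply List.Pairwise.imp_of_mem _ hlt
    intro a b ha hb hab
    have h2a := (List.mem_filter.mp ((PySem.List.mem_sorted _ _ _ _).mp ha)).2
    have h2b := (List.mem_filter.mp ((PySem.List.mem_sorted _ _ _ _).mp hb)).2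
    simp at h2a h2b
    rw [lexKey, lexKey, Prod.Lex.lt_iff]
    simp only [ofLex_toLex]
    right
    exact ⟨by rw [rankOf_eq_two h2a, rankOf_eq_two h2b], hab⟩
  · intro a ha b hb
    have h1 : a ∈ pyMODEL_ORDER := (List.mem_filter.mp ha).1
    have h2b := (List.mem_filter.mp ((PySem.List.mem_sorted _ _ _ _).mp hb)).2
    simp at h2b
    rw [lexKey, lexKey, Prod.Lex.lt_iff]
    simp only [ofLex_toLex]
    left
    have := rankOf_lt_two h1
    rw [rankOf_eq_two h2b]
    omega

lemma b_eq_canon {L : List String} (h : L.Nodup) :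
    PySem.List.sorted L lexKey = canon L :=
  PySem.List.sorted_eq_of_perm_of_pairwise_lt _ _ lexKey (canon_perm h) (canon_pairwise h)

lemma foldl_dedup_append (xs acc : List String) (h : xs.Nodup) :
    xs.foldl (fun acc x => if acc.contains x then acc else acc ++ [x]) acc
      = acc ++ xs.filter (fun x => !acc.contains x) := by
  induction xs generalizing acc with
  | nil => simp
  | cons x xs ih =>
      rcases List.nodup_cons.mp h with ⟨hx, hxs⟩
      by_cases hc : acc.contains x
      · have hmem : x ∈ acc := by simpa using hc
        rw [List.foldl_cons, if_pos hc, ih acc hxs, List.filter_cons]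
        simp [hmem]
      · have hcf : acc.contains x = false := eq_false_of_ne_true hc
        simp only [List.foldl_cons, hcf, Bool.false_eq_true, if_false, ih (acc ++ [x]) hxs,
          List.filter_cons, Bool.not_false, if_true, List.append_assoc, List.singleton_append]
        congr 2
        apply List.filter_congr
        intro y hy
        have hyx : y ≠ x := fun e => hx (e ▸ hy)
        simp [hyx]

lemma a_eq_canon {L : List String} (h : L.Nodup) :
    (PySem.List.sorted L (fun x => x)).foldl
        (fun acc label => if acc.contains label then acc else acc ++ [label])
        (pyMODEL_ORDER.filter (fun label => PySem.Set.contains L label))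
      = canon L := by
  have hnd : (PySem.List.sorted L (fun x : String => x)).Nodup :=
    ((PySem.List.sorted_perm _ _ _).nodup_iff).mpr h
  rw [foldl_dedup_append _ _ hnd]
  unfold canon
  congr 1
  have hstep : ∀ x ∈ PySem.List.sorted L (fun x : String => x),
      (!(pyMODEL_ORDER.filter (fun label => PySem.Set.contains L label)).contains x)
        = (!(pyMODEL_ORDER.contains x)) := by
    intro x hx
    have hxL : x ∈ L := (PySem.List.mem_sorted _ _ _ _).mp hx
    rw [Bool.not_inj_iff, Bool.eq_iff_iff]
    simp [List.mem_filter, hxL]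
  rw [List.filter_congr hstep]
  symm
  apply PySem.List.sorted_eq_of_perm_of_pairwise_lt
  · exact (PySem.List.sorted_perm L (fun x : String => x) false).filter _
  · have hle := PySem.List.sorted_pairwise L (fun x : String => x)
    have hlt : (PySem.List.sorted L (fun x : String => x)).Pairwise (fun a b : String => a < b) :=
      (hle.and hnd).imp (fun hab => lt_of_le_of_ne hab.1 hab.2)
    exact hlt.filter _

-- ===== VERDICT (by name: the statement is the Claim_ definition above) =====
theorem ordered_model_labels_py_spec : Claim_equal_ordered_model_labels_py := by
  intro rows _
  unfold Spec_ordered_model_labels_py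
  have h := nodup_collectLabels rows
  simp only [ordered_model_labels_py, ordered_model_labels_py_alt,
    sorted2_eq_sorted_lexKey, b_eq_canon h, a_eq_canon h]
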